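-- pv_equiv track=rewrite | github.com/gamescomputersplay/sudoku-solver | sudoku-solver.py | get_soft_links_from_group
-- ===== SOURCE A (Python) =====
-- def get_soft_links_from_group(s, n, group):
--     found = []
--     for cell in group:
--         if n in s[cell]:
--             found.append(cell)
--     if len(found) < 3:
--         return []
--
--     links = []
--     for cell1 in found:
--         for cell2 in found:
--             if cell1 != cell2 and [cell2, cell1] not in links:
--                 links.append([cell1, cell2])
--     return links
-- ===== SOURCE B (Python) =====
-- def _pairs(cells):
--     # all unordered pairs [cells[i], cells[j]] with i < j, in order
--     if not cells:
--         return []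
--     head, rest = cells[0], cells[1:]
--     return [[head, c] for c in rest] + _pairs(rest)
--
--
-- def get_soft_links_from_group(s, n, group):
--     found = [cell for cell in group if n in s[cell]]
--     if len(found) < 3:
--         return []
--     return _pairs(found)
-- ===== Notes on version B (the rewrite author's own statement) =====
-- stated objective: simpler
-- what changed: B builds found with a comprehension and enumerates each unordered pair exactly once by recursing on the suffix (head paired with rest), replacing A's double loop over found with a reversed-pair membership scan of the growing links list.
-- outside the precondition, e.g. on get_soft_links_from_group({0: [1], 1: [1]}, 1, [0, 0, 1]): A returns [[0, 1], [0, 1]], B returns [[0, 0], [0, 1], [0, 1]]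
import Mathlib
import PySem

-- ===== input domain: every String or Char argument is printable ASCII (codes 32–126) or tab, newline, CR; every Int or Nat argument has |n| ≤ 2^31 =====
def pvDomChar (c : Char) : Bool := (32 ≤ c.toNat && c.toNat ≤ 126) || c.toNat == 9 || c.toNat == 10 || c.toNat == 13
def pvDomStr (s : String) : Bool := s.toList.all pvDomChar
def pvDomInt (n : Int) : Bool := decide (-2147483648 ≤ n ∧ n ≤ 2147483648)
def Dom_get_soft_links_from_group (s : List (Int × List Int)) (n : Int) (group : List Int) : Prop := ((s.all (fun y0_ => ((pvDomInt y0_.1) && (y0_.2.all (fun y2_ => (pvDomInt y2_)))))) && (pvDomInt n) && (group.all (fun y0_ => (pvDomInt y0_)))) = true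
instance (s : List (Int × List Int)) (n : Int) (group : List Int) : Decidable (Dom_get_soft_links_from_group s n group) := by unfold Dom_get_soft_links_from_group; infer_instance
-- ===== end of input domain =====

-- B replaces A's nested-loop pair builder (with its reversed-pair membership dedup) by a
-- direct once-per-pair enumeration over the suffixes of found; objective: simpler.

-- ===== PORT A =====
-- `n in s[cell]`: Python raises KeyError when cell is not a key of s; Pre_ excludes that,
-- so getD with default [] is exact on the admitted inputs.
def get_soft_links_from_group (s : List (Int × List Int)) (n : Int) (group : List Int) : List (List Int) :=
  let found := group.foldl
    (fun acc cell => if n ∈ (PySem.Dict.mk s).getD cell [] then acc ++ [cell] else acc) []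
  if found.length < 3 then []
  else
    found.foldl (fun links c1 =>
      found.foldl (fun links c2 =>
        if c1 ≠ c2 ∧ [c2, c1] ∉ links then links ++ [[c1, c2]] else links) links) []

-- ===== PORT B =====
-- transliteration of Source B's _pairs: head paired with each later cell, then recurse on the rest
def pvPairs : List Int → List (List Int)
  | [] => []
  | c :: rest => (rest.map fun y => [c, y]) ++ pvPairs rest

def get_soft_links_from_group_alt (s : List (Int × List Int)) (n : Int) (group : List Int) : List (List Int) :=
  let found := group.filter (fun cell => decide (n ∈ (PySem.Dict.mk s).getD cell []))
  if found.length < 3 then []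
  else pvPairs found

-- ===== PRECONDITION & SPEC =====
-- Pre_ excludes (a) inputs where some cell of group is not a key of s (A raises KeyError), and
-- (b) inputs where the ≥3 candidate cells contain a duplicate value, a nonsensical group on which
-- A's reversed-pair membership dedup accidentally emits repeated pairs while B's once-per-pair
-- enumeration also emits [c, c] pairs — both corner outputs are accidental.
def Pre_get_soft_links_from_group (s : List (Int × List Int)) (n : Int) (group : List Int) : Prop :=
  (∀ cell ∈ group, ((PySem.Dict.mk s).get? cell).isSome) ∧
  ((group.filter (fun cell => decide (n ∈ (PySem.Dict.mk s).getD cell []))).Nodup ∨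
   (group.filter (fun cell => decide (n ∈ (PySem.Dict.mk s).getD cell []))).length < 3)
instance (s : List (Int × List Int)) (n : Int) (group : List Int) : Decidable (Pre_get_soft_links_from_group s n group) := by unfold Pre_get_soft_links_from_group; infer_instance

def pvWitness_get_soft_links_from_group : (List (Int × List Int)) × Int × List Int :=
  ([(0, [1]), (1, [1, 2]), (2, [1])], 1, [0, 1, 2])

def Spec_get_soft_links_from_group (s : List (Int × List Int)) (n : Int) (group : List Int) (out : List (List Int)) : Prop := out = get_soft_links_from_group_alt s n group
instance (s : List (Int × List Int)) (n : Int) (group : List Int) (out : List (List Int)) : Decidable (Spec_get_soft_links_from_group s n group out) := by unfold Spec_get_soft_links_from_group; infer_instance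

-- ===== CLAIM (what is proved, stated in full; the proofs are below) =====
def Claim_equal_get_soft_links_from_group : Prop := ∀ (s : List (Int × List Int)) (n : Int) (group : List Int), Dom_get_soft_links_from_group s n group → Pre_get_soft_links_from_group s n group → Spec_get_soft_links_from_group s n group (get_soft_links_from_group s n group)

-- ===== LEMMAS AND PROOFS =====

-- A's found-building loop is B's filter
lemma pv_foldl_filter (p : Int → Prop) [DecidablePred p] :
    ∀ (l acc : List Int),
      l.foldl (fun a c => if p c then a ++ [c] else a) acc = acc ++ l.filter (fun c => decide (p c)) := by
  intro l
  induction l with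
  | nil => simp
  | cons x xs ih =>
      intro acc
      by_cases h : p x
      · rw [List.foldl_cons, if_pos h, ih, List.filter_cons_of_pos (by simpa using h)]
        simp
      · rw [List.foldl_cons, if_neg h, ih, List.filter_cons_of_neg (p := fun z => decide (p z)) (by simpa using h)]

-- A's inner loop appends [c, y] for exactly the y passing the test against the INITIAL links:
-- pairs appended inside the loop all have first component c, so they never trigger the
-- reversed-pair test (which would need first component y ≠ c).
lemma pv_inner_eq (c : Int) :
    ∀ (f : List Int) (L : List (List Int)),
      f.foldl (fun links c2 => if c ≠ c2 ∧ [c2, c] ∉ links then links ++ [[c, c2]] else links) L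
      = L ++ (f.filter (fun y => decide (c ≠ y ∧ [y, c] ∉ L))).map (fun y => [c, y]) := by
  intro f
  induction f with
  | nil => simp
  | cons y f ih =>
      intro L
      by_cases h : c ≠ y ∧ [y, c] ∉ L
      · rw [List.foldl_cons, if_pos h, ih, List.filter_cons_of_pos (p := fun z => decide (c ≠ z ∧ [z, c] ∉ L)) (by simpa using h)]
        have hpred : ∀ z ∈ f,
            (decide (c ≠ z ∧ [z, c] ∉ L ++ [[c, y]])) = (decide (c ≠ z ∧ [z, c] ∉ L)) := by
          intro z _
          rw [decide_eq_decide]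
          constructor
          · rintro ⟨h1, h2⟩
            exact ⟨h1, fun hl => h2 (List.mem_append.mpr (Or.inl hl))⟩
          · rintro ⟨h1, h2⟩
            refine ⟨h1, fun hl => ?_⟩
            rcases List.mem_append.mp hl with hl | hl
            · exact h2 hl
            · obtain ⟨e1, e2⟩ : z = c ∧ c = y := by simpa using List.mem_singleton.mp hl
              exact h1 e1.symm
        rw [show List.filter (fun z => decide (c ≠ z ∧ [z, c] ∉ L ++ [[c, y]])) f
              = List.filter (fun z => decide (c ≠ z ∧ [z, c] ∉ L)) f from List.filter_congr hpred]
        simp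
      · rw [List.foldl_cons, if_neg h, ih, List.filter_cons_of_neg (p := fun z => decide (c ≠ z ∧ [z, c] ∉ L)) (by simpa using h)]

-- invariant for A's outer loop: after processing the prefix p of found, links holds exactly
-- the pairs [a, b] with a ∈ p and b later than a, and the remaining loop contributes pvPairs g
lemma pv_outer_eq :
    ∀ (g p : List Int) (L : List (List Int)),
      (p ++ g).Nodup →
      (∀ y ∈ p, ∀ x ∈ g, [y, x] ∈ L) →
      (∀ l ∈ L, ∃ a b, l = [a, b] ∧ a ∈ p) →
      g.foldl (fun links c1 =>
        (p ++ g).foldl (fun links c2 =>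
          if c1 ≠ c2 ∧ [c2, c1] ∉ links then links ++ [[c1, c2]] else links) links) L
      = L ++ pvPairs g := by
  intro g
  induction g with
  | nil => intro p L _ _ _; simp [pvPairs]
  | cons x g ih =>
      intro p L hnd hin hmem
      have hnd' : (p ++ x :: g).Nodup := hnd
      rw [List.nodup_append] at hnd'
      have hx_not_p : x ∉ p := fun hx => hnd'.2.2 x hx x (by simp) rfl
      have hx_not_g : x ∉ g := (List.nodup_cons.mp hnd'.2.1).1
      have hg_not_p : ∀ y ∈ g, y ∉ p := fun y hy hyp => hnd'.2.2 y hyp y (by simp [hy]) rfl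
      -- the first inner pass: filter over p ++ x :: g reduces to g
      have hfilt : ((p ++ x :: g).filter (fun y => decide (x ≠ y ∧ [y, x] ∉ L))) = g := by
        rw [List.filter_append, List.filter_cons_of_neg (by simp)]
        have h1 : p.filter (fun y => decide (x ≠ y ∧ [y, x] ∉ L)) = [] := by
          rw [List.filter_eq_nil_iff]
          intro y hy
          have hm : [y, x] ∈ L := hin y hy x (by simp)
          simp [hm]
        have h3 : g.filter (fun y => decide (x ≠ y ∧ [y, x] ∉ L)) = g := by
          rw [List.filter_eq_self]
          intro y hy
          have hne : x ≠ y := fun h => hx_not_g (h ▸ hy)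
          have hnl : [y, x] ∉ L := by
            intro hl
            obtain ⟨a, b, hab, hap⟩ := hmem _ hl
            injection hab with e1 e2
            exact hg_not_p y hy (e1 ▸ hap)
          exact decide_eq_true ⟨hne, hnl⟩
        rw [h1, h3]
        simp
      have hstep :
          (p ++ x :: g).foldl (fun links c2 =>
            if x ≠ c2 ∧ [c2, x] ∉ links then links ++ [[x, c2]] else links) L
          = L ++ g.map (fun y => [x, y]) := by
        rw [pv_inner_eq, hfilt]
      have hassoc : p ++ x :: g = (p ++ [x]) ++ g := by simp
      have ih' := ih (p ++ [x]) (L ++ g.map (fun y => [x, y]))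
        (by rw [← hassoc]; exact hnd)
        (by
          intro y hy x' hx'
          rcases List.mem_append.mp hy with hyp | hyx
          · exact List.mem_append.mpr (Or.inl (hin y hyp x' (by simp [hx'])))
          · have : y = x := by simpa using hyx
            subst this
            exact List.mem_append.mpr (Or.inr (List.mem_map.mpr ⟨x', hx', rfl⟩)))
        (by
          intro l hl
          rcases List.mem_append.mp hl with hl | hl
          · obtain ⟨a, b, hab, hap⟩ := hmem _ hl
            exact ⟨a, b, hab, by simp [hap]⟩
          · obtain ⟨y, _, rfl⟩ := List.mem_map.mp hl
            exact ⟨x, y, rfl, by simp⟩)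
      calc (x :: g).foldl (fun links c1 =>
              (p ++ x :: g).foldl (fun links c2 =>
                if c1 ≠ c2 ∧ [c2, c1] ∉ links then links ++ [[c1, c2]] else links) links) L
          = g.foldl (fun links c1 =>
              ((p ++ [x]) ++ g).foldl (fun links c2 =>
                if c1 ≠ c2 ∧ [c2, c1] ∉ links then links ++ [[c1, c2]] else links) links)
              (L ++ g.map (fun y => [x, y])) := by
            rw [List.foldl_cons, hstep, ← hassoc]
        _ = (L ++ g.map (fun y => [x, y])) ++ pvPairs g := ih'
        _ = L ++ pvPairs (x :: g) := by simp [pvPairs]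

-- ===== VERDICT (by name: the statement is the Claim_ definition above) =====
theorem get_soft_links_from_group_spec : Claim_equal_get_soft_links_from_group := by
  intro s n group _ hpre
  unfold Spec_get_soft_links_from_group
  unfold get_soft_links_from_group get_soft_links_from_group_alt
  rw [pv_foldl_filter (fun cell => n ∈ (PySem.Dict.mk s).getD cell []) group []]
  rw [List.nil_append]
  set found := group.filter (fun cell => decide (n ∈ (PySem.Dict.mk s).getD cell [])) with hf
  by_cases hlen : found.length < 3
  · simp [hlen]
  · have hnd : found.Nodup := by
      rcases hpre.2 with h | h
      · exact h
      · exact absurd h hlen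
    simp only [if_neg hlen]
    have := pv_outer_eq found [] [] (by simpa using hnd)
      (by intro y hy; simp at hy) (by intro l hl; simp at hl)
    simpa using this
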